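-- pv_equiv track=rewrite | github.com/AleeCao/Python_exercises | Final_cambio_letras.py | cambio_letra
-- ===== SOURCE A (Python) =====
-- def cambio_letra(letra, letra_ant, paridad):
--     abcd = ['a', 'b', 'c', 'd', 'e', 'f', 'g', 'h', 'i','j', 'k', 'l', 'm', 'n', 'o', 'p', 'q', 'r', 's', 't', 'u', 'v', 'w', 'x', 'y', 'z']
--     for i in range(len(abcd)):
--         if (abcd[i] == letra):
--             if ((lambda es_par:paridad%2 == 0) == True):
--                 return  abcd[i-1]
--             else:
--                 if  (letra == 'z'):
--                     return abcd[0]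
--                 else:
--                     return abcd[i+1]
--         if (letra == ' '):
--             if (letra_ant == 'z'):
--                 return 'y'
--             else:
--                 return 'z'
--         if (letra == '\n'):
--             return "\n"
--         if (letra == '.'):
--             return "."
--         if (letra == ','):
--             return ","
-- ===== SOURCE B (Python) =====
-- def cambio_letra(letra, letra_ant, paridad):
--     # Closed-form dispatch: no alphabet list, no scanning loop.
--     # (paridad is ignored: A's parity branch compares a lambda to True, which is never true.)
--     if letra == ' ':
--         return 'y' if letra_ant == 'z' else 'z'
--     if letra in ('\n', '.', ','):
--         return letra
--     if len(letra) == 1 and 'a' <= letra <= 'z':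
--         return 'a' if letra == 'z' else chr(ord(letra) + 1)
--     return None
-- ===== Notes on version B (the rewrite author's own statement) =====
-- stated objective: simpler
-- what changed: Replaces A's linear scan over a 26-letter list (with per-iteration re-checks of the special characters) by a loop-free closed-form dispatch: direct tests for the four special characters and chr(ord(letra)+1) arithmetic for the letter shift.
-- outside the precondition, e.g. on cambio_letra('A', '', 0): A returns None, B returns None
import Mathlib
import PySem

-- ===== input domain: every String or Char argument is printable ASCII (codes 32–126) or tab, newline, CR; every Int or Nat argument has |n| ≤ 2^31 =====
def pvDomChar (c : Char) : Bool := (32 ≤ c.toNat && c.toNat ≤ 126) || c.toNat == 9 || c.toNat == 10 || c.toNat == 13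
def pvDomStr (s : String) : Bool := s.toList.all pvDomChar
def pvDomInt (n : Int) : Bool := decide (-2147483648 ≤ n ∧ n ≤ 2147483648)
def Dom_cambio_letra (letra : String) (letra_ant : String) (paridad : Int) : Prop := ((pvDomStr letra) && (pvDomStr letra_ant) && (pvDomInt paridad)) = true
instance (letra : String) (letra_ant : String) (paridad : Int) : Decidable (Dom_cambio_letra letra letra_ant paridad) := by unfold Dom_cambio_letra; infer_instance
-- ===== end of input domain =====

-- B replaces A's scan over a 26-letter list by a loop-free closed-form dispatch (objective: simpler).

-- ===== PORT A =====
def pvAbcd : List String :=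
  ["a","b","c","d","e","f","g","h","i","j","k","l","m","n","o","p","q","r","s","t","u","v","w","x","y","z"]

-- Python's `(lambda es_par: paridad % 2 == 0) == True` compares a function object to True: always False.
def pvLambdaEqTrue (_paridad : Int) : Bool := false

-- the `for i in range(len(abcd))` loop, recursing over the remaining indices;
-- `none` = Python's None fall-through after the loop
def cambio_letra_go (letra : String) (letra_ant : String) (paridad : Int) : List Nat → Option String
  | [] => none
  | i :: rest =>
    if pvAbcd.getD i "" = letra then
      if pvLambdaEqTrue paridad then some (pvAbcd.getD (i - 1) "")
      else if letra = "z" then some (pvAbcd.getD 0 "")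
      else some (pvAbcd.getD (i + 1) "")
    else if letra = " " then (if letra_ant = "z" then some "y" else some "z")
    else if letra = "\n" then some "\n"
    else if letra = "." then some "."
    else if letra = "," then some ","
    else cambio_letra_go letra letra_ant paridad rest

-- A returns None (no String) on fall-through; Pre_ excludes that, the default "" is never claimed about
def cambio_letra (letra : String) (letra_ant : String) (paridad : Int) : String :=
  (cambio_letra_go letra letra_ant paridad (List.range 26)).getD ""

-- ===== PORT B =====
def cambio_letra_alt (letra : String) (letra_ant : String) (paridad : Int) : String :=
  if letra = " " then (if letra_ant = "z" then "y" else "z")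
  else if letra = "\n" ∨ letra = "." ∨ letra = "," then letra
  else
    match letra.toList with
    | [c] =>
      if 'a' ≤ c ∧ c ≤ 'z' then
        (if c = 'z' then "a" else String.ofList [Char.ofNat (c.toNat + 1)])
      else ""  -- Python B returns None here; excluded by Pre_
    | _ => ""  -- idem

-- ===== PRECONDITION & SPEC =====
-- Pre_ excludes exactly the inputs on which A falls through the loop and returns None,
-- which is not a value of the declared String return type.
def Pre_cambio_letra (letra : String) (letra_ant : String) (paridad : Int) : Prop :=
  letra ∈ ([" ", "\n", ".", ","] ++ pvAbcd)
instance (letra : String) (letra_ant : String) (paridad : Int) : Decidable (Pre_cambio_letra letra letra_ant paridad) := by unfold Pre_cambio_letra; infer_instance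
def pvWitness_cambio_letra : String × String × Int := ("m", "a", 3)

def Spec_cambio_letra (letra : String) (letra_ant : String) (paridad : Int) (out : String) : Prop := out = cambio_letra_alt letra letra_ant paridad
instance (letra : String) (letra_ant : String) (paridad : Int) (out : String) : Decidable (Spec_cambio_letra letra letra_ant paridad out) := by unfold Spec_cambio_letra; infer_instance

-- ===== CLAIM (what is proved, stated in full; the proofs are below) =====
def Claim_equal_cambio_letra : Prop := ∀ (letra : String) (letra_ant : String) (paridad : Int), Dom_cambio_letra letra letra_ant paridad → Pre_cambio_letra letra letra_ant paridad → Spec_cambio_letra letra letra_ant paridad (cambio_letra letra letra_ant paridad)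

-- ===== LEMMAS AND PROOFS =====

-- ===== VERDICT (by name: the statement is the Claim_ definition above) =====
theorem cambio_letra_spec : Claim_equal_cambio_letra := by
  intro letra letra_ant paridad _hdom hpre
  unfold Pre_cambio_letra pvAbcd at hpre
  show cambio_letra letra letra_ant paridad = cambio_letra_alt letra letra_ant paridad
  fin_cases hpre
  case _ =>  -- letra = " ": both sides branch on letra_ant = "z"
    by_cases h : letra_ant = "z"
    · subst h; rfl
    · simp [cambio_letra, show List.range 26 = 0 :: List.range' 1 25 from by decide,
            cambio_letra_go, cambio_letra_alt, pvAbcd, h]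
  all_goals rfl
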